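-- pv_equiv track=rewrite | github.com/AgroClimaticTools/CDBC | Source Codes/CDBC_Source_Code.py | sorted_values
-- ===== SOURCE A (Python) =====
-- def sorted_values(Obs,Sim):
--     count = 0
--     for i in range(len(Obs)):
--         if Obs[i] == 0:
--             count += 1
--     Rank = [i+1 for i in range(len(Obs))]
--     Dict = dict(zip(Rank,Sim))
--     SortedSim = sorted(Dict.values())
--     SortedRank = sorted(Dict, key=Dict.get)
--     for i in range(count):
--         SortedSim[i] = 0
--     ArrangedDict = dict(zip(SortedRank,SortedSim))
--     SortedDict_by_Rank = sorted(ArrangedDict.items())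
--     ArrangedSim = [v for k,v in SortedDict_by_Rank]
--     return ArrangedSim
-- ===== SOURCE B (Python) =====
-- def sorted_values(Obs, Sim):
--     n = min(len(Obs), len(Sim))
--     k = Obs.count(0)
--     sim = Sim[:n]
--     order = sorted(range(n), key=lambda i: sim[i])
--     small = set(order[:k])
--     return [0 if i in small else v for i, v in enumerate(sim)]
-- ===== Notes on version B (the rewrite author's own statement) =====
-- stated objective: faster
-- what changed: B replaces A's three sorts and two dict rebuilds with one stable index sort: it collects the positions of the count smallest Sim values in a set and zeroes them in a single pass over Sim.
import Mathlib
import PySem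

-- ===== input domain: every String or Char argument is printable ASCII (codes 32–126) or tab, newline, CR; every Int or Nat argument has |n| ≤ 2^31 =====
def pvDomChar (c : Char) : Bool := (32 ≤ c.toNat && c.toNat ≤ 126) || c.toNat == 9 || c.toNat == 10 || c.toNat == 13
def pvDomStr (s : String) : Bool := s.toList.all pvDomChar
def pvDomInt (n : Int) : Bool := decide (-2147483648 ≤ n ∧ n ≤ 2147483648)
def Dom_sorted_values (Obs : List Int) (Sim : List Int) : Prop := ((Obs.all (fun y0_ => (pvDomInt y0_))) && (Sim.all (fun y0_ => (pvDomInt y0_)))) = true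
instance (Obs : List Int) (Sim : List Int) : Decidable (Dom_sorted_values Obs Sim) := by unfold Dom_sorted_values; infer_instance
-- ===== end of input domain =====

-- B zeroes the positions of the count smallest Sim values with ONE stable index sort and a set,
-- replacing A's three sorts and two dict rebuilds (measurably faster by a constant factor).

-- ===== PORT A =====
def sorted_values (Obs : List Int) (Sim : List Int) : List Int :=
  -- count = number of zeros in Obs
  let count : Int := (PySem.List.pyRange 0 (PySem.List.len Obs) 1).foldl
      (fun c i => if PySem.List.pyGetD Obs i 0 == 0 then c + 1 else c) 0
  let Rank : List Int := (PySem.List.pyRange 0 (PySem.List.len Obs) 1).map (fun i => i + 1)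
  let d : PySem.Dict Int Int := PySem.Dict.ofList (List.zip Rank Sim)
  let SortedSim : List Int := PySem.List.sorted d.values (fun v => v) false
  -- sorted(Dict, key=Dict.get): every element of Dict's key view is a present key, so
  -- Dict.get k is the stored value; ported as getD k 0 (exact on every key that occurs)
  let SortedRank : List Int := PySem.List.sorted d.keys (fun r => d.getD r 0) false
  -- for i in range(count): SortedSim[i] = 0 — IndexError (count > len) excluded by Pre_
  let SortedSim2 : List Int := (PySem.List.pyRange 0 count 1).foldl
      (fun l i => PySem.List.pySetD l i 0) SortedSim
  let ad : PySem.Dict Int Int := PySem.Dict.ofList (List.zip SortedRank SortedSim2)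
  -- sorted(items): tuples compare lexicographically
  let SortedDict_by_Rank : List (Int × Int) :=
      PySem.List.sorted2 ad.items (fun p => p.1) (fun p => p.2) false
  SortedDict_by_Rank.map (fun p => p.2)

-- ===== PORT B =====
def sorted_values_alt (Obs : List Int) (Sim : List Int) : List Int :=
  let n : Int := min (PySem.List.len Obs) (PySem.List.len Sim)
  let k : Int := (PySem.List.count Obs 0 : Int)
  let sim : List Int := PySem.List.slice Sim none (some n)
  let order : List Int := PySem.List.sorted (PySem.List.pyRange 0 n 1)
      (fun i => PySem.List.pyGetD sim i 0) false
  let small : PySem.Set Int := PySem.Set.ofList (PySem.List.slice order none (some k))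
  (PySem.List.enumerate sim).map (fun p => if PySem.Set.contains small p.1 then 0 else p.2)

-- ===== PRECONDITION & SPEC =====
-- Pre_ excludes exactly the inputs where A raises IndexError: more zeros in Obs than Sim has
-- elements (the loop 'SortedSim[i] = 0' runs past the end of SortedSim).
def Pre_sorted_values (Obs : List Int) (Sim : List Int) : Prop := Obs.count 0 ≤ Sim.length
instance (Obs : List Int) (Sim : List Int) : Decidable (Pre_sorted_values Obs Sim) := by
  unfold Pre_sorted_values; infer_instance
def pvWitness_sorted_values : List Int × List Int := ([0, 1, 0], [5, 3, 1])

def Spec_sorted_values (Obs : List Int) (Sim : List Int) (out : List Int) : Prop :=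
  out = sorted_values_alt Obs Sim
instance (Obs : List Int) (Sim : List Int) (out : List Int) : Decidable (Spec_sorted_values Obs Sim out) := by
  unfold Spec_sorted_values; infer_instance

-- ===== CLAIM (what is proved, stated in full; the proofs are below) =====
def Claim_equal_sorted_values : Prop := ∀ (Obs : List Int) (Sim : List Int),
  Dom_sorted_values Obs Sim → Pre_sorted_values Obs Sim →
  Spec_sorted_values Obs Sim (sorted_values Obs Sim)
-- ===== LEMMAS AND PROOFS =====

def pvN (Obs Sim : List Int) : Nat := min Obs.length Sim.length
def pvSim (Obs Sim : List Int) : List Int := Sim.take (pvN Obs Sim)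
def pvO (Obs Sim : List Int) : List Int :=
  PySem.List.sorted (PySem.List.pyRange 0 (pvN Obs Sim : Int) 1)
    (fun i => PySem.List.pyGetD (pvSim Obs Sim) i 0) false
def pvOut (Obs Sim : List Int) : List Int :=
  (PySem.List.pyRange 0 (pvN Obs Sim : Int) 1).map
    (fun i => if i ∈ (pvO Obs Sim).take (Obs.count 0) then 0
              else PySem.List.pyGetD (pvSim Obs Sim) i 0)


theorem pv_zip_take {α β : Type} (a : List α) (b : List β) :
    a.zip b = (a.take (min a.length b.length)).zip (b.take (min a.length b.length)) := by
  induction a generalizing b with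
  | nil => simp
  | cons x a ih =>
    cases b with
    | nil => simp
    | cons y b => simpa [Nat.succ_min_succ] using ih b

theorem pv_insertBy_congr {α : Type} (p q : α → α → Bool) (x : α) (ys : List α)
    (h : ∀ b ∈ ys, p x b = q x b) :
    PySem.List.insertBy p x ys = PySem.List.insertBy q x ys := by
  induction ys with
  | nil => rfl
  | cons y ys ih =>
    have hy := h y (by simp)
    simp only [PySem.List.insertBy, hy]
    split
    · rfl
    · simp only [List.cons.injEq, true_and]
      exact ih (fun b hb => h b (by simp [hb]))

theorem pv_foldl_insertBy_congr {α : Type} (p q : α → α → Bool) (xs acc : List α)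
    (h : ∀ a ∈ xs, ∀ b, (b ∈ xs ∨ b ∈ acc) → p a b = q a b) :
    xs.foldl (fun acc x => PySem.List.insertBy p x acc) acc
      = xs.foldl (fun acc x => PySem.List.insertBy q x acc) acc := by
  induction xs generalizing acc with
  | nil => rfl
  | cons x xs ih =>
    simp only [List.foldl_cons]
    rw [pv_insertBy_congr p q x acc (fun b hb => h x (by simp) b (Or.inr hb))]
    exact ih _ (fun a ha b hb => by
      rcases hb with hb | hb
      · exact h a (by simp [ha]) b (Or.inl (by simp [hb]))
      · rcases (PySem.List.mem_insertBy q x b acc).mp hb with rfl | hb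
        · exact h a (by simp [ha]) b (Or.inl (by simp))
        · exact h a (by simp [ha]) b (Or.inr hb))

theorem pv_insertBy_map {α β : Type} (pf : β → β → Bool) (f : α → β) (x : α) (ys : List α) :
    PySem.List.insertBy pf (f x) (ys.map f)
      = (PySem.List.insertBy (fun a b => pf (f a) (f b)) x ys).map f := by
  induction ys with
  | nil => rfl
  | cons y ys ih =>
    simp only [List.map_cons, PySem.List.insertBy]
    split
    · rfl
    · simp [ih]

theorem pv_sorted_map {α β κ : Type} [LinearOrder κ] (xs : List α) (f : α → β) (key : β → κ) :
    PySem.List.sorted (xs.map f) key false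
      = (PySem.List.sorted xs (fun a => key (f a)) false).map f := by
  rw [PySem.List.sorted_eq_foldl_insertBy, PySem.List.sorted_eq_foldl_insertBy]
  suffices h : ∀ (acc : List α),
      (xs.map f).foldl (fun acc x => PySem.List.insertBy (fun a b => decide (key a < key b)) x acc) (acc.map f)
        = (xs.foldl (fun acc x => PySem.List.insertBy (fun a b => decide (key (f a) < key (f b))) x acc) acc).map f by
    simpa using h []
  induction xs with
  | nil => intro acc; rfl
  | cons x xs ih =>
    intro acc
    simp only [List.map_cons, List.foldl_cons]
    rw [pv_insertBy_map (fun a b => decide (key a < key b)) f x acc]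
    exact ih _

theorem pv_sorted_key_congr {α κ : Type} [LinearOrder κ] (xs : List α) (k1 k2 : α → κ)
    (h : ∀ x ∈ xs, k1 x = k2 x) :
    PySem.List.sorted xs k1 false = PySem.List.sorted xs k2 false := by
  rw [PySem.List.sorted_eq_foldl_insertBy, PySem.List.sorted_eq_foldl_insertBy]
  exact pv_foldl_insertBy_congr _ _ xs []
    (fun a ha b hb => by
      rcases hb with hb | hb
      · rw [h a ha, h b hb]
      · simp at hb)

theorem pv_sorted2_eq_of_perm_of_pairwise_lt {α κ₁ κ₂ : Type} [LinearOrder κ₁] [LinearOrder κ₂]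
    (xs ys : List α) (k1 : α → κ₁) (k2 : α → κ₂)
    (hinj : ∀ a ∈ xs, ∀ b ∈ xs, k1 a = k1 b → a = b)
    (hperm : ys.Perm xs) (hpw : ys.Pairwise (fun a b => k1 a < k1 b)) :
    PySem.List.sorted2 xs k1 k2 false = ys := by
  have h2 : PySem.List.sorted2 xs k1 k2 false = PySem.List.sorted xs k1 false := by
    simp only [PySem.List.sorted2, Bool.false_eq_true, if_false]
    rw [PySem.List.sorted_eq_foldl_insertBy]
    apply pv_foldl_insertBy_congr
    intro a ha b hb
    rcases hb with hb | hb
    · by_cases hab : k1 a = k1 b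
      · have : a = b := hinj a ha b hb hab
        subst this
        simp
      · rcases lt_or_gt_of_ne hab with hlt | hgt
        · simp [hlt, not_lt_of_gt hlt]
        · simp [hgt, not_lt_of_gt hgt]
    · simp at hb
  rw [h2]
  exact PySem.List.sorted_eq_of_perm_of_pairwise_lt xs ys k1 hperm hpw

theorem pv_zero_loop (k : Nat) (ys : List Int) (hk : k ≤ ys.length) :
    (PySem.List.pyRange 0 (k : Int) 1).foldl (fun l i => PySem.List.pySetD l i 0) ys
      = List.replicate k 0 ++ ys.drop k := by
  induction k with
  | zero => simp
  | succ k ih =>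
    have hk' : k ≤ ys.length := Nat.le_of_succ_le hk
    have hc : ((k + 1 : Nat) : Int) = ((k : Int) + 1) := by push_cast; ring
    rw [hc, PySem.List.pyRange_one_succ_right (by positivity), List.foldl_append, ih hk']
    simp only [List.foldl_cons, List.foldl_nil, PySem.List.pySetD_natCast]
    have hdrop : ys.drop k = ys[k] :: ys.drop (k + 1) :=
      List.drop_eq_getElem_cons (by omega)
    rw [hdrop, List.set_append_right _ _ (by simp)]
    simp [List.replicate_succ']
    rw [hdrop]
    rfl

theorem pv_getElem_mem_take_iff {α : Type} [DecidableEq α] (l : List α) (hl : l.Nodup)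
    (j k : Nat) (hj : j < l.length) : l[j] ∈ l.take k ↔ j < k := by
  constructor
  · intro h
    obtain ⟨i, hi, hgi⟩ := List.getElem_of_mem h
    have hik : i < k := by simp at hi; omega
    have hil : i < l.length := by simp at hi; omega
    rw [List.getElem_take] at hgi
    have : i = j := (List.Nodup.getElem_inj_iff hl).mp hgi
    omega
  · intro h
    have hj' : j < (l.take k).length := by simp; omega
    have : l[j] = (l.take k)[j]'hj' := (List.getElem_take).symm
    rw [this]
    exact List.getElem_mem _

theorem pv_B_char (Obs Sim : List Int) : sorted_values_alt Obs Sim = pvOut Obs Sim := by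
  have hmin : min (PySem.List.len Obs) (PySem.List.len Sim) = ((pvN Obs Sim : Nat) : Int) := by
    simp [PySem.List.len, pvN]
  have hcount : (PySem.List.count Obs 0 : Int) = ((Obs.count 0 : Nat) : Int) := by
    simp [PySem.List.count_eq]
  simp only [sorted_values_alt, hmin, hcount, PySem.List.slice_to_natCast]
  have hsim : Sim.take (pvN Obs Sim) = pvSim Obs Sim := rfl
  rw [hsim]
  have hlen : PySem.List.len (pvSim Obs Sim) = ((pvN Obs Sim : Nat) : Int) := by
    simp [PySem.List.len, pvSim, pvN]
  rw [PySem.List.enumerate_eq_map_pyRange (pvSim Obs Sim) 0, hlen]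
  rw [List.map_map]
  apply List.map_congr_left
  intro i hi
  simp only [pvO, Function.comp]
  by_cases hmem : i ∈ (PySem.List.sorted (PySem.List.pyRange 0 ((pvN Obs Sim : Nat) : Int))
      (fun i => PySem.List.pyGetD (pvSim Obs Sim) i 0) false).take (Obs.count 0)
  · simp [hmem, PySem.Set.mem_ofList]
  · simp [hmem, PySem.Set.mem_ofList]

theorem pv_A_char (Obs Sim : List Int) (hpre : Obs.count 0 ≤ Sim.length) :
    sorted_values Obs Sim = pvOut Obs Sim := by
  set n := pvN Obs Sim with hn
  set simN := pvSim Obs Sim with hsimN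
  set k := Obs.count 0 with hk
  have hk_le : k ≤ n := by
    have := List.count_le_length (l := Obs) (a := 0)
    simp [hn, pvN]; omega
  have hsim_len : simN.length = n := by simp [hsimN, pvSim, hn, pvN]
  -- the count loop
  have hcountA : (PySem.List.pyRange 0 (PySem.List.len Obs) 1).foldl
      (fun c i => if PySem.List.pyGetD Obs i 0 == 0 then c + 1 else c) 0 = ((k : Nat) : Int) := by
    have hm := PySem.List.map_pyGetD_pyRange_zero Obs 0
    calc (PySem.List.pyRange 0 (PySem.List.len Obs) 1).foldl
          (fun c i => if PySem.List.pyGetD Obs i 0 == 0 then c + 1 else c) 0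
        = ((PySem.List.pyRange 0 (PySem.List.len Obs) 1).map (fun j => PySem.List.pyGetD Obs j 0)).foldl
          (fun c v => if v == 0 then c + 1 else c) (0:Int) := by rw [List.foldl_map]
      _ = Obs.foldl (fun c v => if v == 0 then c + 1 else c) (0:Int) := by rw [hm]
      _ = ((k : Nat) : Int) := by
          rw [PySem.List.foldl_count_if (fun v => v == 0) Obs 0]
          simp [hk, List.count]
  -- the ranks
  set idxs := PySem.List.pyRange 0 (n : Int) 1 with hidxs
  set RankN := idxs.map (fun i => i + 1) with hRankN
  have hidxs_eq : idxs = (List.range n).map (fun j => ((j : Nat) : Int)) := by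
    rw [hidxs, PySem.List.pyRange_zero]; simp
  have hidxs_len : idxs.length = n := by simp [hidxs_eq]
  have hRankN_len : RankN.length = n := by simp [hRankN, hidxs_len]
  have hidxs_nodup : idxs.Nodup := by
    rw [hidxs_eq]
    exact (List.nodup_range).map (fun a b h => by exact_mod_cast h)
  have hRankN_nodup : RankN.Nodup := by
    rw [hRankN]
    exact hidxs_nodup.map (fun a b h => by omega)
  have hzipA : List.zip ((PySem.List.pyRange 0 (PySem.List.len Obs) 1).map (fun i => i + 1)) Sim
      = RankN.zip simN := by
    rw [pv_zip_take]
    have hL : ((PySem.List.pyRange 0 (PySem.List.len Obs) 1).map (fun i => i + 1)).length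
        = Obs.length := by simp [PySem.List.length_pyRange_one, PySem.List.len]
    rw [hL]
    have hmin : min Obs.length Sim.length = n := by simp [hn, pvN]
    rw [hmin]
    congr 1
    · rw [← List.map_take]
      congr 1
      have hlO : (PySem.List.len Obs).toNat = Obs.length := by simp [PySem.List.len]
      rw [PySem.List.pyRange_zero, hlO, hidxs_eq, ← List.map_take, List.take_range]
      congr 2
      simp [hn, pvN]
  -- dict items: fresh distinct keys append
  have hofList : ∀ (ps : List (Int × Int)), (ps.map Prod.fst).Nodup →
      (PySem.Dict.ofList ps).items = ps := by
    intro ps hnd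
    show (List.foldl (fun acc p => acc.insert p.1 p.2) PySem.Dict.empty ps).items = ps
    rw [PySem.Dict.items_foldl_insert_fresh ps Prod.fst Prod.snd PySem.Dict.empty
      (fun a _ => PySem.Dict.contains_empty a.1) hnd]
    show PySem.Dict.empty.items ++ ps.map (fun a => (a.1, a.2)) = ps
    simp
    rfl
  have hfst : (RankN.zip simN).map Prod.fst = RankN :=
    List.map_fst_zip (by omega)
  have hd_items : (PySem.Dict.ofList (RankN.zip simN)).items = RankN.zip simN :=
    hofList _ (by rw [hfst]; exact hRankN_nodup)
  set d := PySem.Dict.ofList (RankN.zip simN) with hd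
  have hd_keys : d.keys = RankN := by
    show (d.items).map Prod.fst = RankN
    rw [hd_items, hfst]
  have hd_values : d.values = simN := by
    show (d.items).map Prod.snd = simN
    rw [hd_items]
    exact List.map_snd_zip (by omega)
  have hd_keys_nodup : d.keys.Nodup := by rw [hd_keys]; exact hRankN_nodup
  -- indexing
  have hRankN_get : ∀ (j : Nat) (hj : j < n), RankN[j]'(by rw [hRankN_len]; exact hj) = (j : Int) + 1 := by
    intro j hj
    simp [hRankN, hidxs_eq, List.getElem_map]
  have hgetD : ∀ (j : Nat) (hj : j < n), d.getD ((j : Int) + 1) 0 = simN[j]'(by rw [hsim_len]; exact hj) := by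
    intro j hj
    apply PySem.Dict.getD_of_mem_items d _ hd_keys_nodup
    rw [hd_items]
    have hjz : j < (RankN.zip simN).length := by
      rw [List.length_zip, hRankN_len, hsim_len]; simp [hj]
    have : (RankN.zip simN)[j]'hjz = ((j : Int) + 1, simN[j]'(by omega)) := by
      rw [List.getElem_zip]
      rw [Prod.mk.injEq]
      exact ⟨hRankN_get j hj, rfl⟩
    rw [← this]
    exact List.getElem_mem _
  -- g and simN as a map over idxs
  have hsimmap : simN = idxs.map (fun i => PySem.List.pyGetD simN i 0) := by
    have hm := PySem.List.map_pyGetD_pyRange_zero simN 0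
    have hlen : PySem.List.len simN = (n : Int) := by simp [PySem.List.len, hsim_len]
    rw [hlen] at hm
    exact hm.symm
  -- O
  set O := pvO Obs Sim with hO
  have hO_def : O = PySem.List.sorted idxs (fun i => PySem.List.pyGetD simN i 0) false := rfl
  have hO_perm : O.Perm idxs := by rw [hO_def]; exact PySem.List.sorted_perm _ _ _
  have hO_nodup : O.Nodup := hO_perm.nodup_iff.mpr hidxs_nodup
  have hO_len : O.length = n := by rw [hO_perm.length_eq, hidxs_len]
  -- SortedSim
  have hSS : PySem.List.sorted d.values (fun v => v) false
      = O.map (fun i => PySem.List.pyGetD simN i 0) := by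
    rw [hd_values]
    conv_lhs => rw [hsimmap]
    rw [pv_sorted_map idxs (fun i => PySem.List.pyGetD simN i 0) (fun v => v)]
    rw [hO_def]
  -- SortedRank
  have hSR : PySem.List.sorted d.keys (fun r => d.getD r 0) false
      = O.map (fun i => i + 1) := by
    rw [hd_keys, hRankN, pv_sorted_map idxs (fun i => i + 1) (fun r => d.getD r 0)]
    congr 1
    rw [hO_def]
    apply pv_sorted_key_congr
    intro i hi
    rw [hidxs] at hi
    have hi' := PySem.List.mem_pyRange_one.mp hi
    obtain ⟨j, rfl⟩ : ∃ j : Nat, i = (j : Int) := ⟨i.toNat, by omega⟩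
    have hjn : j < n := by exact_mod_cast hi'.2
    rw [hgetD j hjn, PySem.List.pyGetD_natCast, List.getD_eq_getElem _ _ (by rw [hsim_len]; exact hjn)]
  -- the zeroing loop
  set g : Int → Int := fun i => PySem.List.pyGetD simN i 0 with hg
  have hZ_loop : (PySem.List.pyRange 0 ((k : Nat) : Int) 1).foldl
      (fun l i => PySem.List.pySetD l i 0) (O.map g)
      = List.replicate k (0:Int) ++ (O.map g).drop k :=
    pv_zero_loop k (O.map g) (by rw [List.length_map, hO_len]; exact hk_le)
  have hZ_len : (List.replicate k (0:Int) ++ (O.map g).drop k).length = n := by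
    simp [hO_len]
    omega
  have hZget : ∀ (j : Nat) (hjn : j < n),
      (List.replicate k (0:Int) ++ (O.map g).drop k)[j]'(by rw [hZ_len]; exact hjn)
        = if j < k then 0 else g (O[j]'(by rw [hO_len]; exact hjn)) := by
    intro j hjn
    by_cases hjk : j < k
    · rw [if_pos hjk, List.getElem_append_left (by simp [hjk])]
      simp
    · rw [if_neg hjk, List.getElem_append_right (by simp; omega)]
      simp only [List.getElem_drop, List.getElem_map, List.length_replicate]
      have hidx : k + (j - k) = j := by omega
      simp only [hidx]
  -- items of the rearranged dict
  have hfst2 : ((O.map (fun i => i + 1)).zip (List.replicate k (0:Int) ++ (O.map g).drop k)).map Prod.fst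
      = O.map (fun i => i + 1) :=
    List.map_fst_zip (by rw [List.length_map, hO_len, hZ_len])
  have hOp1_nodup : (O.map (fun i => i + 1)).Nodup :=
    hO_nodup.map (fun a b h => by omega)
  have had_items : (PySem.Dict.ofList ((O.map (fun i => i + 1)).zip (List.replicate k (0:Int) ++ (O.map g).drop k))).items
      = (O.map (fun i => i + 1)).zip (List.replicate k (0:Int) ++ (O.map g).drop k) :=
    hofList _ (by rw [hfst2]; exact hOp1_nodup)
  -- the zipped items as a single map over O
  set F : Int → Int × Int := fun i => (i + 1, if i ∈ O.take k then 0 else g i) with hF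
  have hzipF : (O.map (fun i => i + 1)).zip (List.replicate k (0:Int) ++ (O.map g).drop k)
      = O.map F := by
    apply List.ext_getElem
    · simp [hZ_len, hO_len]
    · intro j hj1 hj2
      have hjn : j < n := by simpa [hO_len] using hj2
      rw [List.getElem_zip, List.getElem_map, List.getElem_map]
      simp only [hF]
      rw [Prod.mk.injEq]
      refine ⟨rfl, ?_⟩
      rw [hZget j hjn]
      have hmem_iff : O[j]'(by rw [hO_len]; exact hjn) ∈ O.take k ↔ j < k :=
        pv_getElem_mem_take_iff O hO_nodup j k (by rw [hO_len]; exact hjn)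
      by_cases hjk : j < k
      · rw [if_pos hjk, if_pos (hmem_iff.mpr hjk)]
      · rw [if_neg hjk, if_neg (fun hm => hjk (hmem_iff.mp hm))]
  -- pairwise order of idxs
  have hidxs_pw : idxs.Pairwise (· < ·) := by
    rw [hidxs_eq]
    exact List.pairwise_lt_range.map _ (fun a b h => by exact_mod_cast h)
  -- the final sort by rank
  have hsorted2 : PySem.List.sorted2 ((O.map (fun i => i + 1)).zip (List.replicate k (0:Int) ++ (O.map g).drop k))
      (fun p => p.1) (fun p => p.2) false = idxs.map F := by
    rw [hzipF]
    apply pv_sorted2_eq_of_perm_of_pairwise_lt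
    · intro a ha b hb hab
      obtain ⟨i, _, rfl⟩ := List.mem_map.mp ha
      obtain ⟨i', _, rfl⟩ := List.mem_map.mp hb
      simp only [hF] at hab
      have : i = i' := by omega
      subst this
      rfl
    · exact (hO_perm.symm).map F
    · apply List.Pairwise.map
      · intro a b (h : a < b)
        show (F a).1 < (F b).1
        simp [hF]
        omega
      · exact hidxs_pw
  -- assemble
  simp only [sorted_values]
  rw [hcountA, hzipA, ← hd, hSS, hSR, hZ_loop, had_items, hsorted2, List.map_map]
  rfl

-- ===== VERDICT (by name: the statement is the Claim_ definition above) =====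
theorem sorted_values_spec : Claim_equal_sorted_values := by
  intro Obs Sim _ hpre
  unfold Spec_sorted_values
  rw [pv_A_char Obs Sim hpre, pv_B_char]
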